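-- pv_equiv track=rewrite | github.com/sivaven/OmniConnect-ModelForge | projects/cross_species_connectomics/cross_species_nets.py | pathlist2edges
-- ===== SOURCE A (Python) =====
-- def pathlist2edges(source, lst, gmlabels):
--     """Auto-added docstring. See manuscript methods for details."""
--     edges=[]
--     if len(lst)>0:
--         edge=gmlabels[lst[0]]
--         for idx, item in enumerate(lst[1:]):
--             edges.append(edge+'___'+gmlabels[item])
--             edge=gmlabels[item]
--
--     return edges
-- ===== SOURCE B (Python) =====
-- def pathlist2edges(source, lst, gmlabels):
--     # Recursive decomposition: emit the first edge, recurse on the rest of the path.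
--     if len(lst) < 2:
--         return []
--     return [gmlabels[lst[0]] + '___' + gmlabels[lst[1]]] + pathlist2edges(source, lst[1:], gmlabels)
-- ===== Notes on version B (the rewrite author's own statement) =====
-- stated objective: alternative
-- what changed: Replaces A's iterative loop with a rolling 'edge' accumulator by direct structural recursion on the path: emit the edge between the first two nodes and recurse on the tail, with no accumulator state.
import Mathlib
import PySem

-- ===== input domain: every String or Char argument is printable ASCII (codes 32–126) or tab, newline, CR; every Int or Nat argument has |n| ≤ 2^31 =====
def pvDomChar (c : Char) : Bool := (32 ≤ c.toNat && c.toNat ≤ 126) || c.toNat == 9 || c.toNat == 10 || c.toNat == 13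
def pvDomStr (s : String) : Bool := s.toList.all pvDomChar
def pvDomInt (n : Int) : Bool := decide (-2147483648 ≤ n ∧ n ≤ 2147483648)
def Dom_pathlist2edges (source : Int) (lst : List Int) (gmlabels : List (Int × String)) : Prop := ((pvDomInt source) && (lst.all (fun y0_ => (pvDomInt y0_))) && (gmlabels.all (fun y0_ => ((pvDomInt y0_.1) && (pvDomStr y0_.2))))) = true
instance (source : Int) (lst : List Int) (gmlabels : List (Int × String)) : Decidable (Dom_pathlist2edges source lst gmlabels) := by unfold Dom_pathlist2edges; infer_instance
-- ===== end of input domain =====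

-- ===== PORT A =====
-- A: iterative loop over lst[1:] carrying a rolling 'edge' (previous label) accumulator.
def pathlist2edges (source : Int) (lst : List Int) (gmlabels : List (Int × String)) : List String :=
  match lst with
  | [] => []
  | h :: t =>
    (t.foldl
      (fun (st : List String × String) item =>
        (st.1 ++ [st.2 ++ "___" ++ PySem.Dict.getD (PySem.Dict.mk gmlabels) item ""],
         PySem.Dict.getD (PySem.Dict.mk gmlabels) item ""))
      ([], PySem.Dict.getD (PySem.Dict.mk gmlabels) h "")).1

-- ===== PORT B =====
-- B: structural recursion — emit the edge between the first two nodes, recurse on the tail.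
def pathlist2edges_alt (source : Int) (lst : List Int) (gmlabels : List (Int × String)) : List String :=
  match lst with
  | a :: b :: t =>
    (PySem.Dict.getD (PySem.Dict.mk gmlabels) a "" ++ "___" ++ PySem.Dict.getD (PySem.Dict.mk gmlabels) b "")
      :: pathlist2edges_alt source (b :: t) gmlabels
  | _ => []

-- ===== PRECONDITION & SPEC =====
-- Pre_ excludes inputs where Python raises KeyError: every element of lst must be a key of gmlabels.
def Pre_pathlist2edges (source : Int) (lst : List Int) (gmlabels : List (Int × String)) : Prop :=
  (lst.all (fun x => (PySem.Dict.mk gmlabels).contains x)) = true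
instance (source : Int) (lst : List Int) (gmlabels : List (Int × String)) : Decidable (Pre_pathlist2edges source lst gmlabels) := by unfold Pre_pathlist2edges; infer_instance
def pvWitness_pathlist2edges : Int × List Int × (List (Int × String)) := (0, [1, 2, 1], [(1, "a"), (2, "b")])

def Spec_pathlist2edges (source : Int) (lst : List Int) (gmlabels : List (Int × String)) (out : List String) : Prop := out = pathlist2edges_alt source lst gmlabels
instance (source : Int) (lst : List Int) (gmlabels : List (Int × String)) (out : List String) : Decidable (Spec_pathlist2edges source lst gmlabels out) := by unfold Spec_pathlist2edges; infer_instance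

-- ===== CLAIM (what is proved, stated in full; the proofs are below) =====
def Claim_equal_pathlist2edges : Prop := ∀ (source : Int) (lst : List Int) (gmlabels : List (Int × String)), Dom_pathlist2edges source lst gmlabels → Pre_pathlist2edges source lst gmlabels → Spec_pathlist2edges source lst gmlabels (pathlist2edges source lst gmlabels)

-- ===== LEMMAS AND PROOFS =====
-- Loop invariant: the accumulator loop starting from (acc, f h) produces acc ++ B's recursion on (h :: t).
theorem p2e_loop (source : Int) (gmlabels : List (Int × String)) (t : List Int) (h : Int) (acc : List String) :
    (t.foldl (fun (st : List String × String) item =>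
        (st.1 ++ [st.2 ++ "___" ++ PySem.Dict.getD (PySem.Dict.mk gmlabels) item ""],
         PySem.Dict.getD (PySem.Dict.mk gmlabels) item ""))
      (acc, PySem.Dict.getD (PySem.Dict.mk gmlabels) h "")).1
      = acc ++ pathlist2edges_alt source (h :: t) gmlabels := by
  induction t generalizing h acc with
  | nil => simp [pathlist2edges_alt]
  | cons b t ih => simp [List.foldl, pathlist2edges_alt, ih b]

-- ===== VERDICT (by name: the statement is the Claim_ definition above) =====
theorem pathlist2edges_spec : Claim_equal_pathlist2edges := by
  intro source lst gmlabels _ _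
  unfold Spec_pathlist2edges pathlist2edges
  cases lst with
  | nil => simp [pathlist2edges_alt]
  | cons h t => simpa using p2e_loop source gmlabels t h []
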